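-- pv_equiv track=rewrite | github.com/TheoVanengelandt/AlgorithmeXOR | xor.py | has_forbidden_digraphs
-- ===== SOURCE A (Python) =====
-- def has_forbidden_digraphs(text):
--     forbidden_digraphs = ['cj', 'fq', 'gx', 'hx', 'jf', 'jq', 'jx', 'jz', 'qb',
--                           'qc', 'qj', 'qk', 'qx', 'qz', 'sx', 'vf', 'vj', 'vq',
--                           'vx', 'wx', 'xj', 'zx']
--     for digraph in forbidden_digraphs:
--         if digraph in text:
--             return True
--     return False
-- ===== SOURCE B (Python) =====
-- def has_forbidden_digraphs(text):
--     # forbidden digraphs grouped by first letter: map first char -> string of bad followers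
--     seconds = {'c': 'j', 'f': 'q', 'g': 'x', 'h': 'x', 'j': 'fqxz',
--                'q': 'bcjkxz', 's': 'x', 'v': 'fjqx', 'w': 'x', 'x': 'j',
--                'z': 'x'}
--     prev = None
--     for ch in text:
--         if prev is not None and ch in seconds.get(prev, ''):
--             return True
--         prev = ch
--     return False
-- ===== Notes on version B (the rewrite author's own statement) =====
-- stated objective: alternative
-- what changed: Instead of 22 whole-text substring scans, B makes one stateful pass over the characters, carrying the previous character and checking the current one against a dict mapping each first letter of a forbidden digraph to its allowed-forbidden second letters.
import Mathlib
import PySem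

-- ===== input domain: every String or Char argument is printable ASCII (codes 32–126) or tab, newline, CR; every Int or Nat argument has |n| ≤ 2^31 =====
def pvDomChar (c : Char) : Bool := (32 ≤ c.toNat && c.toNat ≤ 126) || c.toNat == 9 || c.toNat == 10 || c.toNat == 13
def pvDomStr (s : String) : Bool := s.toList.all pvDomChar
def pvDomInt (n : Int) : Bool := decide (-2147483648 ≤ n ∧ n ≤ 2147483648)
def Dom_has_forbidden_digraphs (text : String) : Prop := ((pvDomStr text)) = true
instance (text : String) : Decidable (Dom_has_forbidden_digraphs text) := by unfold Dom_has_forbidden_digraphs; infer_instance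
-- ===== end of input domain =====

-- B replaces A's 22 whole-text substring scans by one stateful pass over the
-- characters, carrying the previous character and checking the current one against
-- a dict mapping first letters to their forbidden followers (alternative algorithm).


-- ===== PORT A =====
def pvForbiddenList : List String :=
  ["cj", "fq", "gx", "hx", "jf", "jq", "jx", "jz", "qb",
   "qc", "qj", "qk", "qx", "qz", "sx", "vf", "vj", "vq",
   "vx", "wx", "xj", "zx"]

-- the for-loop with early return over the digraph list
def pvALoop (text : String) : List String → Bool
  | [] => false
  | d :: rest => if PySem.Str.isIn d text then true else pvALoop text rest

def has_forbidden_digraphs (text : String) : Bool :=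
  pvALoop text pvForbiddenList

-- ===== PORT B =====
-- the dict literal 'seconds'
def pvSeconds : PySem.Dict Char String :=
  PySem.Dict.ofList
    [('c', "j"), ('f', "q"), ('g', "x"), ('h', "x"), ('j', "fqxz"),
     ('q', "bcjkxz"), ('s', "x"), ('v', "fjqx"), ('w', "x"), ('x', "j"),
     ('z', "x")]

-- the for-loop over the characters carrying prev (None → Option Char);
-- 'ch in seconds.get(prev, "")' is a single-char substring test
def pvBLoop (prev : Option Char) : List Char → Bool
  | [] => false
  | c :: rest =>
      if (match prev with
          | some p => PySem.Str.isIn (String.ofList [c]) (PySem.Dict.getD pvSeconds p "")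
          | none => false)
      then true
      else pvBLoop (some c) rest

def has_forbidden_digraphs_alt (text : String) : Bool :=
  pvBLoop none text.toList

-- ===== PRECONDITION & SPEC =====
def Spec_has_forbidden_digraphs (text : String) (out : Bool) : Prop := out = has_forbidden_digraphs_alt text
instance (text : String) (out : Bool) : Decidable (Spec_has_forbidden_digraphs text out) := by unfold Spec_has_forbidden_digraphs; infer_instance

-- ===== CLAIM (what is proved, stated in full; the proofs are below) =====
def Claim_equal_has_forbidden_digraphs : Prop := ∀ (text : String), Dom_has_forbidden_digraphs text → Spec_has_forbidden_digraphs text (has_forbidden_digraphs text)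

-- ===== LEMMAS AND PROOFS =====

-- the 22 forbidden digraphs as character pairs (proof-side bridge between the ports)
def pvPairs : List (Char × Char) :=
  [('c','j'), ('f','q'), ('g','x'), ('h','x'), ('j','f'), ('j','q'), ('j','x'),
   ('j','z'), ('q','b'), ('q','c'), ('q','j'), ('q','k'), ('q','x'), ('q','z'),
   ('s','x'), ('v','f'), ('v','j'), ('v','q'), ('v','x'), ('w','x'), ('x','j'),
   ('z','x')]

-- B's per-step test, as a named function
def pvCheck (p c : Char) : Bool :=
  PySem.Str.isIn (String.ofList [c]) (PySem.Dict.getD pvSeconds p "")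

theorem pvSeconds_mk : pvSeconds = PySem.Dict.mk
    [('c', "j"), ('f', "q"), ('g', "x"), ('h', "x"), ('j', "fqxz"),
     ('q', "bcjkxz"), ('s', "x"), ('v', "fjqx"), ('w', "x"), ('x', "j"),
     ('z', "x")] := by decide

-- A's loop is an `any` over the digraph list
theorem pvALoop_eq_any (text : String) :
    ∀ ds : List String, pvALoop text ds = ds.any (fun d => PySem.Str.isIn d text) := by
  intro ds
  induction ds with
  | nil => rfl
  | cons d rest ih =>
    simp only [pvALoop, List.any_cons, ← ih]
    by_cases h : PySem.Str.isIn d text = true <;> simp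

-- a single element is an infix iff it is a member
theorem pvInfix_singleton (a : Char) (l : List Char) : ([a] <:+: l) ↔ a ∈ l := by
  constructor
  · intro h; exact h.subset (List.mem_singleton_self a)
  · intro h
    obtain ⟨s, t, rfl⟩ := List.append_of_mem h
    exact ⟨s, t, by simp⟩

-- B's per-step test agrees with membership in the pair list
theorem pvCheck_iff (a b : Char) : pvCheck a b = true ↔ (a, b) ∈ pvPairs := by
  unfold pvCheck
  rw [PySem.Str.isIn_iff_infix, String.toList_ofList, pvInfix_singleton]
  by_cases h1 : a = 'c'
  · subst h1; rw [show PySem.Dict.getD pvSeconds 'c' "" = "j" from by decide]; simp [pvPairs]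
  by_cases h2 : a = 'f'
  · subst h2; rw [show PySem.Dict.getD pvSeconds 'f' "" = "q" from by decide]; simp [pvPairs]
  by_cases h3 : a = 'g'
  · subst h3; rw [show PySem.Dict.getD pvSeconds 'g' "" = "x" from by decide]; simp [pvPairs]
  by_cases h4 : a = 'h'
  · subst h4; rw [show PySem.Dict.getD pvSeconds 'h' "" = "x" from by decide]; simp [pvPairs]
  by_cases h5 : a = 'j'
  · subst h5; rw [show PySem.Dict.getD pvSeconds 'j' "" = "fqxz" from by decide]; simp [pvPairs]
  by_cases h6 : a = 'q'
  · subst h6; rw [show PySem.Dict.getD pvSeconds 'q' "" = "bcjkxz" from by decide]; simp [pvPairs]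
  by_cases h7 : a = 's'
  · subst h7; rw [show PySem.Dict.getD pvSeconds 's' "" = "x" from by decide]; simp [pvPairs]
  by_cases h8 : a = 'v'
  · subst h8; rw [show PySem.Dict.getD pvSeconds 'v' "" = "fjqx" from by decide]; simp [pvPairs]
  by_cases h9 : a = 'w'
  · subst h9; rw [show PySem.Dict.getD pvSeconds 'w' "" = "x" from by decide]; simp [pvPairs]
  by_cases h10 : a = 'x'
  · subst h10; rw [show PySem.Dict.getD pvSeconds 'x' "" = "j" from by decide]; simp [pvPairs]
  by_cases h11 : a = 'z'
  · subst h11; rw [show PySem.Dict.getD pvSeconds 'z' "" = "x" from by decide]; simp [pvPairs]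
  have hc : PySem.Dict.getD pvSeconds a "" = "" := by
    apply PySem.Dict.getD_of_not_contains
    rw [pvSeconds_mk, PySem.Dict.contains_eq_decide_mem_keys, PySem.Dict.keys_mk]
    simp [h1, h2, h3, h4, h5, h6, h7, h8, h9, h10, h11]
  rw [hc]
  simp [pvPairs, Prod.ext_iff, h1, h2, h3, h4, h5, h6, h7, h8, h9, h10, h11]

-- a two-character list is an infix exactly when it occurs as an adjacent pair
theorem pvInfix_pair (a b : Char) :
    ∀ l : List Char, ([a, b] <:+: l) ↔ (a, b) ∈ l.zip l.tail := by
  intro l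
  induction l with
  | nil => simp
  | cons c rest ih =>
    cases rest with
    | nil =>
      simp only [List.infix_cons_iff]
      constructor
      · rintro (h | h)
        · rcases h with ⟨t, ht⟩; simp at ht
        · rcases h with ⟨s, t, ht⟩
          have := congrArg List.length ht; simp at this
      · intro h; simp at h
    | cons d r =>
      rw [List.infix_cons_iff, ih]
      constructor
      · rintro (hpre | hmem)
        · rcases hpre with ⟨t, ht⟩
          simp only [List.cons_append, List.cons.injEq] at ht
          obtain ⟨rfl, rfl, -⟩ := ht
          simp [List.zip]
        · simp only [List.tail_cons] at hmem ⊢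
          exact List.mem_cons_of_mem _ hmem
      · intro hmem
        simp only [List.tail_cons, List.zip_cons_cons, List.mem_cons] at hmem
        rcases hmem with heq | hmem
        · left
          obtain ⟨rfl, rfl⟩ := Prod.mk.injEq .. ▸ heq
          exact ⟨r, rfl⟩
        · right; simpa [List.zip] using hmem

-- every forbidden digraph has exactly two characters
theorem pvForbidden_len2 : ∀ d ∈ pvForbiddenList, ∃ a b, d.toList = [a, b] := by
  intro d hd
  have h2 : d.toList.length = 2 := by
    have : pvForbiddenList.all (fun d => d.toList.length == 2) = true := by decide
    rw [List.all_eq_true] at this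
    simpa using this d hd
  match hl : d.toList with
  | [a, b] => exact ⟨a, b, rfl⟩
  | [] | [_] | _ :: _ :: _ :: _ => rw [hl] at h2; simp at h2

-- a two-character string is forbidden iff its pair is in the pair list
theorem pvMk_mem_iff (a b : Char) :
    (String.ofList [a, b] ∈ pvForbiddenList) ↔ (a, b) ∈ pvPairs := by
  simp only [pvForbiddenList, pvPairs, List.mem_cons, List.not_mem_nil, or_false,
    ← String.toList_inj]
  simp [String.toList_ofList]

-- B's loop with prev = some a is an `any` over the adjacent pairs of a :: l
theorem pvBLoop_some (a : Char) :
    ∀ l : List Char, pvBLoop (some a) l = ((a :: l).zip l).any (fun p => pvCheck p.1 p.2) := by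
  intro l
  induction l generalizing a with
  | nil => rfl
  | cons b t ih =>
    simp only [pvBLoop, List.zip_cons_cons, List.any_cons, ih b]
    cases h : PySem.Str.isIn (String.ofList [b]) (PySem.Dict.getD pvSeconds a "") <;>
      simp only [pvCheck, h] <;> simp

-- B's loop is an `any` over the adjacent pairs of the text
theorem pvBLoop_none (l : List Char) :
    pvBLoop none l = (l.zip l.tail).any (fun p => pvCheck p.1 p.2) := by
  cases l with
  | nil => rfl
  | cons c rest => simpa [pvBLoop] using pvBLoop_some c rest

-- ===== VERDICT (by name: the statement is the Claim_ definition above) =====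
theorem has_forbidden_digraphs_spec : Claim_equal_has_forbidden_digraphs := by
  intro text _
  unfold Spec_has_forbidden_digraphs has_forbidden_digraphs has_forbidden_digraphs_alt
  rw [pvALoop_eq_any, pvBLoop_none, Bool.eq_iff_iff, List.any_eq_true, List.any_eq_true]
  constructor
  · rintro ⟨d, hd, hin⟩
    obtain ⟨a, b, hab⟩ := pvForbidden_len2 d hd
    have hinf : d.toList <:+: text.toList := (PySem.Str.isIn_iff_infix _ _).mp hin
    rw [hab] at hinf
    refine ⟨(a, b), (pvInfix_pair a b _).mp hinf, ?_⟩
    rw [pvCheck_iff, ← pvMk_mem_iff]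
    have hmk : String.ofList [a, b] = d := by
      rw [← hab, String.ofList_toList]
    rw [hmk]; exact hd
  · rintro ⟨⟨a, b⟩, hmem, hcheck⟩
    have hd : String.ofList [a, b] ∈ pvForbiddenList :=
      (pvMk_mem_iff a b).mpr ((pvCheck_iff a b).mp hcheck)
    refine ⟨String.ofList [a, b], hd, ?_⟩
    rw [PySem.Str.isIn_iff_infix, String.toList_ofList]
    exact (pvInfix_pair a b _).mpr hmem
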